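-- pv_equiv track=rewrite | github.com/CodingThrust/problem-reductions | docs/paper/verify-reductions/adversary_k_satisfiability_kernel.py | find_kernel_structural
-- ===== SOURCE A (Python) =====
-- def find_kernel_structural(n, clauses, nv, arcs):
--     """Find kernel by only checking literal-vertex subsets (from proof)."""
--     succ = [[] for _ in range(nv)]
--     for (u, v) in arcs:
--         succ[u].append(v)
--
--     for bits in range(1 << n):
--         sel = set()
--         for i in range(n):
--             if (bits >> i) & 1:
--                 sel.add(2 * i)
--             else:
--                 sel.add(2 * i + 1)
--
--         # Check kernel properties
--         valid = True
--         for u in range(nv):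
--             if u in sel:
--                 for v in succ[u]:
--                     if v in sel:
--                         valid = False
--                         break
--                 if not valid:
--                     break
--             else:
--                 if not any(v in sel for v in succ[u]):
--                     valid = False
--                     break
--         if valid:
--             return True, sel
--
--     return False, None
-- ===== SOURCE B (Python) =====
-- def find_kernel_structural(n, clauses, nv, arcs):
--     """Find kernel by recursive backtracking over the variables (same succ
--     setup as the original; the flat 0..2^n bits loop is replaced by a
--     recursion choosing each variable's literal, visiting assignments in the
--     same ascending order)."""
--     succ = [[] for _ in range(nv)]
--     for (u, v) in arcs:
--         succ[u].append(v)
--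
--     def ok(sel):
--         return all(
--             all(v not in sel for v in succ[u]) if u in sel
--             else any(v in sel for v in succ[u])
--             for u in range(nv)
--         )
--
--     def search(i, acc):
--         if i == 0:
--             return acc if ok(set(acc)) else None
--         r = search(i - 1, [2 * (i - 1) + 1] + acc)
--         if r is not None:
--             return r
--         return search(i - 1, [2 * (i - 1)] + acc)
--
--     r = search(n, [])
--     if r is not None:
--         return True, set(r)
--     return False, None
-- ===== Notes on version B (the rewrite author's own statement) =====
-- stated objective: alternative
-- what changed: The flat loop over all 2^n bitmasks (rebuilding the selection set and running a break-laden check per mask) is replaced by recursive backtracking over the variables, prepending each chosen literal (bit-0 literal 2i+1 tried first, so assignments are visited in the same ascending order), with the kernel check written as a single all/any comprehension.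
import Mathlib
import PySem

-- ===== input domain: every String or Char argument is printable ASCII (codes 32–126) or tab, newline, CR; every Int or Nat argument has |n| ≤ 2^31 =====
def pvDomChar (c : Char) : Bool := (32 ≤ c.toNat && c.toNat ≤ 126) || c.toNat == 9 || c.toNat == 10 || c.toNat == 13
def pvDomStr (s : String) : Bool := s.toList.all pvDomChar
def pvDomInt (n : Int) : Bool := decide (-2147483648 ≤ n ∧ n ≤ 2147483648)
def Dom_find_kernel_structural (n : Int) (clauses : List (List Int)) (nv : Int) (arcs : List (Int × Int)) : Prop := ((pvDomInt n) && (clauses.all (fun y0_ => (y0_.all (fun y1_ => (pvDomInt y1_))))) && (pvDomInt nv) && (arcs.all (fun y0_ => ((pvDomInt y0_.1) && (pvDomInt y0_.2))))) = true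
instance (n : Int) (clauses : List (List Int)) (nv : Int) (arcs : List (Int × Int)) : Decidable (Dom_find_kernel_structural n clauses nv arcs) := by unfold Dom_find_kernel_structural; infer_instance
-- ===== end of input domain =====

-- B replaces A's flat loop over all 2^n bitmasks by recursive backtracking over
-- the variables (same visiting order) with the kernel check as an all/any scan:
-- objective 'alternative', same asymptotic cost. 'clauses' is unused by both,
-- exactly as in the Python.

-- ===== PORT A =====
-- succ = [[] for _ in range(nv)]; for (u,v) in arcs: succ[u].append(v)
-- (identical lines open A and B in Python, so both ports use this helper;
--  pyGetD/pySetD are faithful under Pre_'s in-range condition on arcs)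
def pvSucc (nv : Int) (arcs : List (Int × Int)) : List (List Int) :=
  arcs.foldl
    (fun s uv => PySem.List.pySetD s uv.1 (PySem.List.pyGetD s uv.1 [] ++ [uv.2]))
    ((PySem.List.pyRange 0 nv 1).map (fun _ => ([] : List Int)))

-- sel = set(); for i in range(n): sel.add(2*i if (bits>>i)&1 else 2*i+1)
def pvSelA (n : Int) (bits : Int) : List Int :=
  (PySem.List.pyRange 0 n 1).foldl
    (fun s i =>
      PySem.Set.add s (if PySem.Int.band (bits >>> i.toNat) 1 == 1 then 2 * i else 2 * i + 1))
    PySem.Set.empty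

-- the 'for u in range(nv)' check with its two breaks (an && chain)
def pvCheckA (succ : List (List Int)) (sel : List Int) : List Int → Bool
  | [] => true
  | u :: rest =>
    if sel.contains u then
      (PySem.List.pyGetD succ u []).all (fun v => !sel.contains v) && pvCheckA succ sel rest
    else
      (PySem.List.pyGetD succ u []).any (fun v => sel.contains v) && pvCheckA succ sel rest

-- for bits in range(1 << n): … return True, sel on the first valid sel
-- (range is a lazy counter in Python: ported as a count-down fuel of 1 << n
--  remaining values with the ascending bits counter, stopping at the first hit)
def pvLoopA (n nv : Int) (succ : List (List Int)) : Nat → Int → Bool × Option (List Int)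
  | 0, _ => (false, none)
  | rem + 1, bits =>
    let sel := pvSelA n bits
    if pvCheckA succ sel (PySem.List.pyRange 0 nv 1) then (true, some sel)
    else pvLoopA n nv succ rem (bits + 1)

def find_kernel_structural (n : Int) (_clauses : List (List Int)) (nv : Int) (arcs : List (Int × Int)) : Bool × Option (List Int) :=
  pvLoopA n nv (pvSucc nv arcs) ((1 : Int) <<< n.toNat).toNat 0

-- ===== PORT B =====
-- ok(sel): all(… if u in sel else … for u in range(nv))
def pvOkB (nv : Int) (succ : List (List Int)) (sel : List Int) : Bool :=
  (PySem.List.pyRange 0 nv 1).all (fun u =>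
    if sel.contains u then (PySem.List.pyGetD succ u []).all (fun v => !sel.contains v)
    else (PySem.List.pyGetD succ u []).any (fun v => sel.contains v))

-- search(i, acc): i == 0 → leaf check; else try [2*(i-1)+1]+acc then [2*(i-1)]+acc
-- (the countdown 'i' is a Nat so the recursion is structural; B's Python counts
--  the same i = n, n-1, …, 0 for n ≥ 0, which Pre_ guarantees)
def pvSearchB (nv : Int) (succ : List (List Int)) : Nat → List Int → Option (List Int)
  | 0, acc => if pvOkB nv succ (PySem.Set.ofList acc) then some acc else none
  | i + 1, acc =>
    match pvSearchB nv succ i ((2 * (i : Int) + 1) :: acc) with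
    | some r => some r
    | none => pvSearchB nv succ i ((2 * (i : Int)) :: acc)

def find_kernel_structural_alt (n : Int) (_clauses : List (List Int)) (nv : Int) (arcs : List (Int × Int)) : Bool × Option (List Int) :=
  let succ := pvSucc nv arcs
  match pvSearchB nv succ n.toNat [] with
  | some r => (true, some (PySem.Set.ofList r))
  | none => (false, none)

-- ===== PRECONDITION & SPEC =====
-- Pre_ excludes exactly the inputs where A raises: n < 0 (range(1 << n) raises
-- ValueError) and arcs with a source index u outside -nv ≤ u < nv (succ[u]
-- raises IndexError; for nv ≤ 0 that is every arc).
def Pre_find_kernel_structural (n : Int) (clauses : List (List Int)) (nv : Int) (arcs : List (Int × Int)) : Prop :=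
  0 ≤ n ∧ ∀ p ∈ arcs, -nv ≤ p.1 ∧ p.1 < nv
instance (n : Int) (clauses : List (List Int)) (nv : Int) (arcs : List (Int × Int)) : Decidable (Pre_find_kernel_structural n clauses nv arcs) := by unfold Pre_find_kernel_structural; infer_instance
def pvWitness_find_kernel_structural : Int × List (List Int) × Int × (List (Int × Int)) := (1, [[1]], 2, [(0, 1)])

def Spec_find_kernel_structural (n : Int) (clauses : List (List Int)) (nv : Int) (arcs : List (Int × Int)) (out : Bool × Option (List Int)) : Prop := out = find_kernel_structural_alt n clauses nv arcs
instance (n : Int) (clauses : List (List Int)) (nv : Int) (arcs : List (Int × Int)) (out : Bool × Option (List Int)) : Decidable (Spec_find_kernel_structural n clauses nv arcs out) := by unfold Spec_find_kernel_structural; infer_instance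

-- ===== CLAIM (what is proved, stated in full; the proofs are below) =====
def Claim_equal_find_kernel_structural : Prop := ∀ (n : Int) (clauses : List (List Int)) (nv : Int) (arcs : List (Int × Int)), Dom_find_kernel_structural n clauses nv arcs → Pre_find_kernel_structural n clauses nv arcs → Spec_find_kernel_structural n clauses nv arcs (find_kernel_structural n clauses nv arcs)

-- ===== LEMMAS AND PROOFS =====

-- the literal list [l_0, …, l_{i-1}] that bit pattern `b` selects
def pvSelN (b : Nat) (i : Nat) : List Int :=
  (List.range i).map (fun k => if b.testBit k then (2 * (k : Int)) else 2 * (k : Int) + 1)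

theorem pvSelN_nodup (b i : Nat) : (pvSelN b i).Nodup := by
  refine List.Nodup.map ?_ (List.nodup_range)
  intro k1 k2 h
  by_cases h1 : b.testBit k1 <;> by_cases h2 : b.testBit k2 <;>
    simp [h1, h2] at h <;> omega

theorem pvFoldlAdd_of_nodup (xs acc : List Int) (h : (acc ++ xs).Nodup) :
    xs.foldl PySem.Set.add acc = acc ++ xs := by
  induction xs generalizing acc with
  | nil => simp
  | cons x rest ih =>
    have hxm : x ∉ acc := by
      rw [List.nodup_append] at h
      intro hm
      exact (h.2.2 x hm x List.mem_cons_self) rfl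
    have hrec := ih (acc ++ [x]) (by simpa using h)
    simp only [List.foldl_cons, PySem.Set.add]
    rw [if_neg (by simpa using hxm), hrec]
    simp

theorem pvOfList_nodup (xs : List Int) (h : xs.Nodup) : PySem.Set.ofList xs = xs := by
  have := pvFoldlAdd_of_nodup xs [] (by simpa using h)
  simpa [PySem.Set.ofList, PySem.Set.empty] using this

theorem pvTestBit_char (b k : Nat) : b.testBit k = (((b >>> k) &&& 1) == 1) := by
  simp [Nat.testBit, Nat.and_one_is_mod]

theorem pvBeqCast (x : Nat) : (((x : Nat) : Int) == 1) = (x == 1) := by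
  by_cases h : x = 1 <;> simp [h]

theorem pvFindSome?_congr {α β : Type} (l : List α) (f g : α → Option β)
    (h : ∀ a ∈ l, f a = g a) : l.findSome? f = l.findSome? g := by
  induction l with
  | nil => rfl
  | cons a rest ih =>
    rw [List.findSome?_cons, List.findSome?_cons, h a (List.mem_cons_self)]
    cases g a with
    | some v => rfl
    | none => exact ih (fun a ha => h a (List.mem_cons_of_mem _ ha))

-- A's per-bits set build equals pvSelN
theorem pvSelA_eq (n : Int) (hn : 0 ≤ n) (b : Nat) :
    pvSelA n (b : Int) = pvSelN b n.toNat := by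
  unfold pvSelA
  have hrange := PySem.List.pyRange_zero_nat n.toNat
  rw [Int.toNat_of_nonneg hn] at hrange
  rw [hrange, List.foldl_map]
  simp only [Int.toNat_natCast]
  have hbody : ∀ (s : List Int) (k : Nat),
      PySem.Set.add s
        (if PySem.Int.band ((b : Int) >>> ((k : Nat) : Int)) 1 == 1 then 2 * (k : Int)
         else 2 * (k : Int) + 1)
      = PySem.Set.add s (if b.testBit k then (2 * (k : Int)) else 2 * (k : Int) + 1) := by
    intro s k
    have hsh : ((b : Int) >>> ((k : Nat) : Int)) = ((b >>> k : Nat) : Int) := by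
      rw [Int.shiftRight_natCast_right, Int.natCast_shiftRight]
    have hband : PySem.Int.band ((b >>> k : Nat) : Int) 1 = (((b >>> k) &&& 1 : Nat) : Int) := by
      exact_mod_cast PySem.Int.band_natCast (b >>> k) 1
    rw [hsh, hband, pvBeqCast, ← pvTestBit_char]
  refine Eq.trans (List.foldl_ext _
    (fun (s : List Int) (k : Nat) =>
      PySem.Set.add s (if b.testBit k then (2 * (k : Int)) else 2 * (k : Int) + 1))
    PySem.Set.empty (fun s k _ => hbody s k)) ?_
  unfold pvSelN
  rw [← List.foldl_map
    (f := fun k : Nat => if b.testBit k then (2 * (k : Int)) else 2 * (k : Int) + 1)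
    (g := PySem.Set.add)]
  exact pvFoldlAdd_of_nodup _ [] (by simpa using pvSelN_nodup b n.toNat)

-- A's break-laden check is B's all/any scan
theorem pvCheckA_eq_all (succ : List (List Int)) (sel : List Int) (us : List Int) :
    pvCheckA succ sel us = us.all (fun u =>
      if sel.contains u then (PySem.List.pyGetD succ u []).all (fun v => !sel.contains v)
      else (PySem.List.pyGetD succ u []).any (fun v => sel.contains v)) := by
  induction us with
  | nil => rfl
  | cons u rest ih =>
    simp only [pvCheckA, ih, List.all_cons]
    split <;> rfl

theorem pvCheckA_eq_okB (nv : Int) (succ : List (List Int)) (sel : List Int) :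
    pvCheckA succ sel (PySem.List.pyRange 0 nv 1) = pvOkB nv succ sel := by
  rw [pvCheckA_eq_all]; rfl

theorem pvOkB_ofList (nv : Int) (succ : List (List Int)) (sel : List Int) :
    pvOkB nv succ (PySem.Set.ofList sel) = pvOkB nv succ sel := by
  unfold pvOkB
  simp only [List.contains_eq_mem, PySem.Set.mem_ofList]

-- B's backtracking enumerates exactly the pvSelN lists for b = 0 … 2^i - 1
theorem pvSearchB_eq (nv : Int) (succ : List (List Int)) (i : Nat) (acc : List Int) :
    pvSearchB nv succ i acc =
      (List.range (2 ^ i)).findSome? (fun b =>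
        if pvOkB nv succ (PySem.Set.ofList (pvSelN b i ++ acc)) then some (pvSelN b i ++ acc)
        else none) := by
  induction i generalizing acc with
  | zero => simp [pvSearchB, pvSelN]
  | succ i ih =>
    have hsel0 : ∀ b : Nat, b < 2 ^ i →
        pvSelN b (i + 1) = pvSelN b i ++ [2 * (i : Int) + 1] := by
      intro b hb
      unfold pvSelN
      rw [List.range_succ, List.map_append]
      simp [Nat.testBit_lt_two_pow hb]
    have hsel1 : ∀ b : Nat, b < 2 ^ i →
        pvSelN (2 ^ i + b) (i + 1) = pvSelN b i ++ [2 * (i : Int)] := by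
      intro b hb
      unfold pvSelN
      rw [List.range_succ, List.map_append]
      congr 1
      · refine List.map_congr_left ?_
        intro k hk
        rw [List.mem_range] at hk
        rw [Nat.testBit_two_pow_add_gt hk]
      · simp [Nat.testBit_two_pow_add_eq, Nat.testBit_lt_two_pow hb]
    have hpow : 2 ^ (i + 1) = 2 ^ i + 2 ^ i := by ring
    rw [pvSearchB, ih ((2 * (i : Int) + 1) :: acc), ih ((2 * (i : Int)) :: acc),
        hpow, List.range_add, List.findSome?_append, List.findSome?_map]
    have e1 : ∀ b ∈ List.range (2 ^ i),
        (if pvOkB nv succ (PySem.Set.ofList (pvSelN b i ++ (2 * (i : Int) + 1) :: acc))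
         then some (pvSelN b i ++ (2 * (i : Int) + 1) :: acc) else none)
        = (if pvOkB nv succ (PySem.Set.ofList (pvSelN b (i + 1) ++ acc))
           then some (pvSelN b (i + 1) ++ acc) else none) := by
      intro b hb
      rw [List.mem_range] at hb
      rw [hsel0 b hb, List.append_assoc]
      rfl
    have e2 : ∀ b ∈ List.range (2 ^ i),
        (if pvOkB nv succ (PySem.Set.ofList (pvSelN b i ++ (2 * (i : Int)) :: acc))
         then some (pvSelN b i ++ (2 * (i : Int)) :: acc) else none)
        = ((fun b' =>
            if pvOkB nv succ (PySem.Set.ofList (pvSelN b' (i + 1) ++ acc))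
            then some (pvSelN b' (i + 1) ++ acc) else none) ∘ (fun x => 2 ^ i + x)) b := by
      intro b hb
      rw [List.mem_range] at hb
      simp only [Function.comp_apply]
      rw [hsel1 b hb, List.append_assoc]
      rfl
    rw [pvFindSome?_congr _ _ _ e1, pvFindSome?_congr _ _ _ e2]
    cases hfs : (List.range (2 ^ i)).findSome? (fun b =>
        if pvOkB nv succ (PySem.Set.ofList (pvSelN b (i + 1) ++ acc))
        then some (pvSelN b (i + 1) ++ acc) else none) <;> simp [Option.or]

-- A's search loop as a findSome? over its list of bits values
theorem pvLoopA_eq (n nv : Int) (succ : List (List Int)) (cnt : Nat) :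
    ∀ start : Int, pvLoopA n nv succ cnt start =
      match ((List.range cnt).map (fun k : Nat => start + (k : Int))).findSome? (fun bits =>
        if pvCheckA succ (pvSelA n bits) (PySem.List.pyRange 0 nv 1) then some (pvSelA n bits)
        else none) with
      | some s => (true, some s)
      | none => (false, none) := by
  induction cnt with
  | zero => intro start; rfl
  | succ cnt ih =>
    intro start
    have hlist : (List.range (cnt + 1)).map (fun k : Nat => start + (k : Int))
        = start :: (List.range cnt).map (fun k : Nat => (start + 1) + (k : Int)) := by
      rw [List.range_succ_eq_map, List.map_cons, List.map_map]
      congr 1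
      · simp
      · refine List.map_congr_left (fun k _ => ?_)
        simp only [Function.comp_apply]
        push_cast
        ring
    rw [hlist, List.findSome?_cons]
    by_cases h : pvCheckA succ (pvSelA n start) (PySem.List.pyRange 0 nv 1) <;>
      simp [pvLoopA, h, ih (start + 1)]

theorem pvShift_one (m : Nat) : (1 : Int) <<< m = ((2 ^ m : Nat) : Int) := by
  simp [Int.shiftLeft_eq]

-- ===== VERDICT (by name: the statement is the Claim_ definition above) =====
theorem find_kernel_structural_spec : Claim_equal_find_kernel_structural := by
  intro n clauses nv arcs _hdom hpre
  obtain ⟨hn, _harcs⟩ := hpre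
  unfold Spec_find_kernel_structural
  have ha : find_kernel_structural n clauses nv arcs
      = pvLoopA n nv (pvSucc nv arcs) ((1 : Int) <<< n.toNat).toNat 0 := rfl
  have halt : find_kernel_structural_alt n clauses nv arcs
      = (match pvSearchB nv (pvSucc nv arcs) n.toNat [] with
         | some r => (true, some (PySem.Set.ofList r))
         | none => (false, none)) := rfl
  rw [ha, halt, pvSearchB_eq]
  have hcnt : ((1 : Int) <<< n.toNat).toNat = 2 ^ n.toNat := by
    rw [pvShift_one]; exact Int.toNat_natCast _
  rw [hcnt, pvLoopA_eq]
  have hzero : (List.range (2 ^ n.toNat)).map (fun k : Nat => (0 : Int) + (k : Int))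
      = (List.range (2 ^ n.toNat)).map (fun b : Nat => (b : Int)) := by
    refine List.map_congr_left (fun k _ => ?_); ring
  rw [hzero, List.findSome?_map]
  have hAside : ∀ b ∈ List.range (2 ^ n.toNat),
      ((fun bits =>
        if pvCheckA (pvSucc nv arcs) (pvSelA n bits) (PySem.List.pyRange 0 nv 1)
        then some (pvSelA n bits) else none) ∘ (fun b : Nat => (b : Int))) b
      = (if pvOkB nv (pvSucc nv arcs) (PySem.Set.ofList (pvSelN b n.toNat ++ []))
         then some (pvSelN b n.toNat ++ []) else none) := by
    intro b _
    simp only [Function.comp_apply]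
    rw [pvSelA_eq n hn b, pvCheckA_eq_okB, List.append_nil, pvOkB_ofList]
  rw [pvFindSome?_congr _ _ _ hAside]
  cases hfs : (List.range (2 ^ n.toNat)).findSome? (fun b =>
      if pvOkB nv (pvSucc nv arcs) (PySem.Set.ofList (pvSelN b n.toNat ++ []))
      then some (pvSelN b n.toNat ++ []) else none) with
  | none => rfl
  | some r =>
    obtain ⟨b, _, hb⟩ := List.exists_of_findSome?_eq_some hfs
    have hr : r = pvSelN b n.toNat := by
      simp at hb
      exact hb.2.symm
    rw [hr]
    show (true, some (pvSelN b n.toNat)) = (true, some (PySem.Set.ofList (pvSelN b n.toNat)))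
    rw [pvOfList_nodup _ (pvSelN_nodup b n.toNat)]
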